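-- pv_equiv track=rewrite | github.com/Winoe-AI/winoe-ai-backend | app/trials/services/trials_services_trials_codespace_specializer_runtime_service.py | _split_diff_blocks
-- ===== SOURCE A (Python) =====
-- def _split_diff_blocks(patch_text: str) -> list[str]:
--     blocks: list[str] = []
--     current: list[str] = []
--     for line in patch_text.splitlines():
--         if line.startswith("diff --git "):
--             if current:
--                 blocks.append("\n".join(current))
--             current = [line]
--             continue
--         if current:
--             current.append(line)
--     if current:
--         blocks.append("\n".join(current))
--     return blocks
-- ===== SOURCE B (Python) =====
-- def _split_diff_blocks(patch_text: str) -> list[str]: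
--     lines = patch_text.splitlines()
--     starts = [i for i, line in enumerate(lines) if line.startswith("diff --git ")]
--     ends = starts[1:] + [len(lines)]
--     return ["\n".join(lines[s:e]) for s, e in zip(starts, ends)]
-- ===== Notes on version B (the rewrite author's own statement) =====
-- stated objective: alternative
-- what changed: Replaces A's single-pass stateful accumulator (blocks/current lists mutated per line) by a two-pass decomposition: first build an index table of the positions of the git-header lines, then slice the line list between consecutive boundaries and join each slice.
import Mathlib
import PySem

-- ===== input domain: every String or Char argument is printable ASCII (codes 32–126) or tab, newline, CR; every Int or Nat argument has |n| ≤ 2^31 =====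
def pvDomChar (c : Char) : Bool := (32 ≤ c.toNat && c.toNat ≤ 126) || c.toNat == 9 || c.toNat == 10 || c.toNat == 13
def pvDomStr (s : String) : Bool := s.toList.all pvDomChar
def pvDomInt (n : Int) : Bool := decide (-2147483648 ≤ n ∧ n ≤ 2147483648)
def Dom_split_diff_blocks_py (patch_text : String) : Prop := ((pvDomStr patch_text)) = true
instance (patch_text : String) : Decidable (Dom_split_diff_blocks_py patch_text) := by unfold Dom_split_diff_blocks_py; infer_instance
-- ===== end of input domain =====

-- B replaces A's single-pass stateful accumulator by a two-pass boundary table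
-- (header indices) plus slicing; objective: alternative decomposition, same cost.

-- ===== PORT A =====
-- literal transliteration of A: one fold over splitlines with state (blocks, current)
def split_diff_blocks_py (patch_text : String) : List String :=
  let step : (List String × List String) → String → (List String × List String) :=
    fun st line =>
      if PySem.Str.startswith line "diff --git " then
        ((if st.2 ≠ [] then st.1 ++ [PySem.Str.join "\n" st.2] else st.1), [line])
      else
        (st.1, if st.2 ≠ [] then st.2 ++ [line] else st.2)
  let r := (PySem.Str.splitlines patch_text).foldl step ([], [])
  if r.2 ≠ [] then r.1 ++ [PySem.Str.join "\n" r.2] else r.1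

-- ===== PORT B =====
-- literal transliteration of Source B: enumerate+filter builds the boundary table, then slice
def split_diff_blocks_py_alt (patch_text : String) : List String :=
  let lines := PySem.Str.splitlines patch_text
  let starts := ((PySem.List.enumerate lines).filter
      (fun p => PySem.Str.startswith p.2 "diff --git ")).map (·.1)
  let ends := PySem.List.slice starts (some 1) none ++ [PySem.List.len lines]
  (starts.zip ends).map (fun p => PySem.Str.join "\n" (PySem.List.slice lines (some p.1) (some p.2)))

-- ===== PRECONDITION & SPEC =====
def Spec_split_diff_blocks_py (patch_text : String) (out : List String) : Prop := out = split_diff_blocks_py_alt patch_text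
instance (patch_text : String) (out : List String) : Decidable (Spec_split_diff_blocks_py patch_text out) := by unfold Spec_split_diff_blocks_py; infer_instance

-- ===== CLAIM (what is proved, stated in full; the proofs are below) =====
def Claim_equal_split_diff_blocks_py : Prop := ∀ (patch_text : String), Dom_split_diff_blocks_py patch_text → Spec_split_diff_blocks_py patch_text (split_diff_blocks_py patch_text)

-- ===== LEMMAS AND PROOFS =====

-- the header test
def isH (l : String) : Bool := PySem.Str.startswith l "diff --git "

-- reference grouping: grp cur ls extends the open block cur through ls
def grp (cur : List String) : List String → List (List String)
  | [] => [cur]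
  | l :: ls => if isH l then cur :: grp [l] ls else grp (cur ++ [l]) ls

-- reference grouping from the top (no open block yet)
def grpTop : List String → List (List String)
  | [] => []
  | l :: ls => if isH l then grp [l] ls else grpTop ls

-- indices of the header lines
def startsN : List String → List Nat
  | [] => []
  | l :: ls => if isH l then 0 :: (startsN ls).map (· + 1) else (startsN ls).map (· + 1)

def stepA : (List String × List String) → String → (List String × List String) :=
  fun st line =>
    if isH line then
      ((if st.2 ≠ [] then st.1 ++ [PySem.Str.join "\n" st.2] else st.1), [line])
    else
      (st.1, if st.2 ≠ [] then st.2 ++ [line] else st.2)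

def finishA (st : List String × List String) : List String :=
  if st.2 ≠ [] then st.1 ++ [PySem.Str.join "\n" st.2] else st.1

theorem A_fold (ls : List String) : ∀ (blocks cur : List String), cur ≠ [] →
    finishA (ls.foldl stepA (blocks, cur)) = blocks ++ (grp cur ls).map (PySem.Str.join "\n") := by
  induction ls with
  | nil => intro blocks cur h; simp [finishA, grp, h]
  | cons l ls ih =>
    intro blocks cur h
    rw [List.foldl_cons]
    by_cases hl : isH l = true
    · rw [show stepA (blocks, cur) l = (blocks ++ [PySem.Str.join "\n" cur], [l]) from by
        simp [stepA, hl, h]]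
      rw [ih _ [l] (by simp)]
      simp [grp, hl]
    · rw [show stepA (blocks, cur) l = (blocks, cur ++ [l]) from by simp [stepA, hl, h]]
      rw [ih _ _ (by simp)]
      simp [grp, hl]

theorem A_fold0 (ls : List String) : ∀ (blocks : List String),
    finishA (ls.foldl stepA (blocks, [])) = blocks ++ (grpTop ls).map (PySem.Str.join "\n") := by
  induction ls with
  | nil => intro blocks; simp [finishA, grpTop]
  | cons l ls ih =>
    intro blocks
    rw [List.foldl_cons]
    by_cases hl : isH l = true
    · rw [show stepA (blocks, []) l = (blocks, [l]) from by simp [stepA, hl]]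
      rw [A_fold ls blocks [l] (by simp)]
      simp [grpTop, hl]
    · rw [show stepA (blocks, []) l = (blocks, []) from by simp [stepA, hl]]
      rw [ih]
      simp [grpTop, hl]

-- A equals the reference grouping
theorem A_eq_grpTop (p : String) :
    split_diff_blocks_py p = (grpTop (PySem.Str.splitlines p)).map (PySem.Str.join "\n") := by
  have h := A_fold0 (PySem.Str.splitlines p) []
  rw [List.nil_append] at h
  exact h

-- the filtered-enumerate index table equals startsN (shifted by the start offset)
theorem starts_eq (ls : List String) : ∀ (s : Int),
    ((PySem.List.enumerate ls s).filter (fun p => isH p.2)).map (·.1)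
      = (startsN ls).map (fun n : Nat => s + (n : Int)) := by
  induction ls with
  | nil => intro s; simp [PySem.List.enumerate_nil, startsN]
  | cons l ls ih =>
    intro s
    rw [PySem.List.enumerate_cons, List.filter_cons]
    by_cases hl : isH l = true
    · rw [if_pos (show (fun p : Int × String => isH p.2) (s, l) = true from hl)]
      rw [show startsN (l :: ls) = 0 :: (startsN ls).map (· + 1) from by simp [startsN, hl]]
      rw [List.map_cons, List.map_cons, List.map_map, ih (s + 1)]
      refine congrArg₂ List.cons (by simp) (List.map_congr_left ?_)
      intro n _
      simp only [Function.comp_apply]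
      push_cast
      ring
    · rw [if_neg (show ¬ (fun p : Int × String => isH p.2) (s, l) = true from hl)]
      rw [show startsN (l :: ls) = (startsN ls).map (· + 1) from by simp [startsN, hl]]
      rw [List.map_map, ih (s + 1)]
      refine List.map_congr_left ?_
      intro n _
      simp only [Function.comp_apply]
      push_cast
      ring

-- block for a (start, end) pair of natural indices
def blockOf (ls : List String) (p : Nat × Nat) : String :=
  PySem.Str.join "\n" ((ls.drop p.1).take (p.2 - p.1))

def BN (ls : List String) : List String :=
  ((startsN ls).zip ((startsN ls).tail ++ [ls.length])).map (blockOf ls)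

-- grp characterised by the first header index of its tail
theorem grp_first (ls : List String) : ∀ (cur : List String),
    grp cur ls = match startsN ls with
      | [] => [cur ++ ls]
      | k :: _ => (cur ++ ls.take k) :: grpTop ls := by
  induction ls with
  | nil => intro cur; simp [grp, startsN]
  | cons l ls ih =>
    intro cur
    by_cases hl : isH l = true
    · simp [grp, startsN, hl, grpTop]
    · simp only [grp, startsN, hl, Bool.false_eq_true, if_neg, not_false_iff]
      rw [ih (cur ++ [l])]
      cases h : startsN ls with
      | nil => simp
      | cons k S => simp [grpTop, hl, List.take_succ_cons]

-- shifting all boundaries by one and prepending a line leaves the blocks unchanged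
theorem BN_shift (l : String) (ls : List String) (S : List Nat) :
    ((S.map (· + 1)).zip ((S.map (· + 1)).tail ++ [ls.length + 1])).map (blockOf (l :: ls))
      = (S.zip (S.tail ++ [ls.length])).map (blockOf ls) := by
  have h1 : (S.map (· + 1)).tail ++ [ls.length + 1] = (S.tail ++ [ls.length]).map (· + 1) := by
    rw [List.map_append, ← List.map_tail]
    simp
  rw [h1, List.zip_map, List.map_map]
  refine List.map_congr_left ?_
  intro p _
  simp [blockOf, Nat.succ_sub_succ]

theorem BN_eq (ls : List String) : BN ls = (grpTop ls).map (PySem.Str.join "\n") := by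
  induction ls with
  | nil => simp [BN, startsN, grpTop]
  | cons l ls ih =>
    have key := BN_shift l ls (startsN ls)
    have ih' := ih
    unfold BN at ih'
    by_cases hl : isH l = true
    · unfold BN
      cases h : startsN ls with
      | nil =>
        simp only [startsN, hl, if_true, h, List.map_nil, List.tail_cons, List.nil_append,
          List.zip_cons_cons, List.zip_nil_right, List.map_cons, List.map_nil, List.length_cons]
        rw [show grpTop (l :: ls) = grp [l] ls from by simp [grpTop, hl], grp_first, h]
        simp [blockOf, List.take_of_length_le]
      | cons k S =>
        rw [h] at key ih'
        simp only [List.map_cons, List.tail_cons] at key ih'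
        simp only [startsN, hl, if_true, h, List.map_cons, List.tail_cons, List.length_cons,
          List.cons_append, List.zip_cons_cons]
        rw [key, ih']
        rw [show grpTop (l :: ls) = grp [l] ls from by simp [grpTop, hl], grp_first, h]
        simp [blockOf, List.take_succ_cons]
    · unfold BN
      simp only [startsN, hl, Bool.false_eq_true, if_neg, not_false_iff, List.length_cons]
      rw [key, ih']
      simp [grpTop, hl]

-- B equals the reference grouping
theorem B_eq_grpTop (p : String) :
    split_diff_blocks_py_alt p = (grpTop (PySem.Str.splitlines p)).map (PySem.Str.join "\n") := by
  rw [← BN_eq]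
  show (let lines := PySem.Str.splitlines p
        let starts := ((PySem.List.enumerate lines).filter
            (fun q => PySem.Str.startswith q.2 "diff --git ")).map (·.1)
        let ends := PySem.List.slice starts (some 1) none ++ [PySem.List.len lines]
        (starts.zip ends).map
          (fun q => PySem.Str.join "\n" (PySem.List.slice lines (some q.1) (some q.2)))) = _
  set lines := PySem.Str.splitlines p with hlines
  have hs : ((PySem.List.enumerate lines).filter
      (fun q => PySem.Str.startswith q.2 "diff --git ")).map (·.1)
      = (startsN lines).map (fun n : Nat => (n : Int)) := by
    have := starts_eq lines 0
    simpa [isH] using this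
  simp only [hs, PySem.List.slice_from_one, PySem.List.len_eq, ← List.map_tail]
  rw [show ((startsN lines).tail).map (fun n : Nat => (n : Int)) ++ [((lines.length : Nat) : Int)]
        = ((startsN lines).tail ++ [lines.length]).map (fun n : Nat => (n : Int)) from by simp]
  rw [List.zip_map, List.map_map]
  unfold BN
  refine List.map_congr_left ?_
  intro q _
  simp [blockOf, PySem.List.slice_natCast]

-- ===== VERDICT (by name: the statement is the Claim_ definition above) =====
theorem split_diff_blocks_py_spec : Claim_equal_split_diff_blocks_py := by
  intro p _
  unfold Spec_split_diff_blocks_py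
  rw [A_eq_grpTop, B_eq_grpTop]
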